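-- pv_equiv track=rewrite | github.com/aidan-t-chang/comps | Weekly425/rearrangeksubstringstoformtargetstring.py | isPossibleToRearrange
-- ===== SOURCE A (Python) =====
-- from collections import defaultdict
--
-- def isPossibleToRearrange(s: str, t: str, k: int) -> bool:
--     if s == t:
--         return True
--
--     contention = []
--     l = 0
--     for r in range(len(s)//k, len(s)+1, len(s)//k):
--         contention.append(s[l:r])
--         l = r
--
--     count = defaultdict(int)
--     for sub in contention:
--         count[sub] += 1
--
--     comparison = []
--     l = 0
--     for r in range(len(t)//k, len(t)+1, len(t)//k):
--         comparison.append(t[l:r])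
--         l = r
--
--     for c in comparison:
--         if count[c] == 0:
--             return False
--         count[c] -= 1
--     return True
-- ===== SOURCE B (Python) =====
-- def isPossibleToRearrange(s: str, t: str, k: int) -> bool:
--     if s == t:
--         return True
--
--     def chunks(x):
--         step = len(x) // k
--         return [x[i * step:(i + 1) * step] for i in range(len(x) // step)]
--
--     ss = sorted(chunks(s))
--     tt = sorted(chunks(t))
--     i = 0
--     for c in tt:
--         while i < len(ss) and ss[i] < c:
--             i += 1
--         if i == len(ss) or ss[i] != c:
--             return False
--         i += 1
--     return True
-- ===== Notes on version B (the rewrite author's own statement) =====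
-- stated objective: alternative
-- what changed: Replaces A's defaultdict multiset with decrement draw-down by splitting via an index-based chunk comprehension, sorting both chunk lists and checking multiset containment with a single two-pointer merge pass (same semantics, raises on the same inputs).
import Mathlib
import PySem

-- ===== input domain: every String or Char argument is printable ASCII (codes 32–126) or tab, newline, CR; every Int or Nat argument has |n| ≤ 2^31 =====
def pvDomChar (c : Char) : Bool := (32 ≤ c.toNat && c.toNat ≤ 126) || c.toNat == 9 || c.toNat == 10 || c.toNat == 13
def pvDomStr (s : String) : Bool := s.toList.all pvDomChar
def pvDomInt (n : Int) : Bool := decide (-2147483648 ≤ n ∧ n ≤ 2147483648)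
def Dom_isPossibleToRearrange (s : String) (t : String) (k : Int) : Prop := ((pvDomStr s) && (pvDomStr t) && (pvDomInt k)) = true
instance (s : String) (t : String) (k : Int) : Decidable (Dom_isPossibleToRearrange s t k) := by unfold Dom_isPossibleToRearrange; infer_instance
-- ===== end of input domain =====

-- B replaces A's defaultdict count-and-decrement with an index-based chunk comprehension,
-- sorting both chunk lists and a two-pointer merge containment pass (alternative algorithm).

-- ===== PORT A =====
-- A's chunk-splitting loop: for r in range(len(x)//k, len(x)+1, len(x)//k): append x[l:r]; l = r
def pvSplitA (x : String) (k : Int) : List String :=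
  ((PySem.List.pyRange (PySem.Int.floordiv (PySem.Str.len x) k) (PySem.Str.len x + 1)
      (PySem.Int.floordiv (PySem.Str.len x) k)).foldl
    (fun (acc : List String × Int) r => (acc.1 ++ [PySem.Str.slice x (some acc.2) (some r)], r))
    ([], 0)).1

-- A's final loop: for c in comparison: if count[c] == 0: return False; count[c] -= 1
def pvDrawDown (d : PySem.Dict String Int) : List String → Bool
  | [] => true
  | c :: cs => if d.getD c 0 == 0 then false else pvDrawDown (d.modify c 0 (· - 1)) cs

def isPossibleToRearrange (s : String) (t : String) (k : Int) : Bool :=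
  if s == t then true
  else
    let contention := pvSplitA s k
    let count := contention.foldl (fun d x => d.modify x 0 (· + 1)) PySem.Dict.empty
    let comparison := pvSplitA t k
    pvDrawDown count comparison

-- ===== PORT B =====
-- B's chunks(x): [x[i*step:(i+1)*step] for i in range(len(x)//step)]
def pvChunks (x : String) (k : Int) : List String :=
  (PySem.List.pyRange 0
      (PySem.Int.floordiv (PySem.Str.len x) (PySem.Int.floordiv (PySem.Str.len x) k)) 1).map
    (fun i => PySem.Str.slice x (some (i * PySem.Int.floordiv (PySem.Str.len x) k))
      (some ((i + 1) * PySem.Int.floordiv (PySem.Str.len x) k)))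

-- B's two-pointer pass over the sorted lists, as the obvious structural recursion
def pvMerge : List String → List String → Bool
  | _, [] => true
  | [], _ :: _ => false
  | a :: ss, c :: cs =>
    if a < c then pvMerge ss (c :: cs)
    else if a == c then pvMerge ss cs
    else false

def isPossibleToRearrange_alt (s : String) (t : String) (k : Int) : Bool :=
  if s == t then true
  else
    pvMerge (PySem.List.sorted (pvChunks s k) (fun x => x) false)
            (PySem.List.sorted (pvChunks t k) (fun x => x) false)

-- ===== PRECONDITION & SPEC =====
-- Pre_ excludes exactly the inputs on which Python A raises (and s ≠ t, so the early return
-- does not fire): k = 0 gives ZeroDivisionError, and a zero range step len(s)//k = 0 or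
-- len(t)//k = 0 gives ValueError.
def Pre_isPossibleToRearrange (s : String) (t : String) (k : Int) : Prop :=
  s = t ∨ (k ≠ 0 ∧ PySem.Int.floordiv (PySem.Str.len s) k ≠ 0 ∧ PySem.Int.floordiv (PySem.Str.len t) k ≠ 0)
instance (s : String) (t : String) (k : Int) : Decidable (Pre_isPossibleToRearrange s t k) := by
  unfold Pre_isPossibleToRearrange; infer_instance

def pvWitness_isPossibleToRearrange : String × String × Int := ("abcd", "cdab", 2)

def Spec_isPossibleToRearrange (s : String) (t : String) (k : Int) (out : Bool) : Prop := out = isPossibleToRearrange_alt s t k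
instance (s : String) (t : String) (k : Int) (out : Bool) : Decidable (Spec_isPossibleToRearrange s t k out) := by unfold Spec_isPossibleToRearrange; infer_instance

-- ===== CLAIM (what is proved, stated in full; the proofs are below) =====
def Claim_equal_isPossibleToRearrange : Prop := ∀ (s : String) (t : String) (k : Int), Dom_isPossibleToRearrange s t k → Pre_isPossibleToRearrange s t k → Spec_isPossibleToRearrange s t k (isPossibleToRearrange s t k)

-- ===== LEMMAS AND PROOFS =====

-- the chunk list A's fold builds, written structurally (proof-only helper)
def pvChunksFrom (x : String) : Int → List Int → List String
  | _, [] => []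
  | l, r :: rs => PySem.Str.slice x (some l) (some r) :: pvChunksFrom x r rs

theorem pvFoldA_eq (x : String) (rs : List Int) :
    ∀ (acc : List String) (l : Int),
    (rs.foldl (fun (a : List String × Int) r => (a.1 ++ [PySem.Str.slice x (some a.2) (some r)], r)) (acc, l)).1
      = acc ++ pvChunksFrom x l rs := by
  induction rs with
  | nil => intro acc l; simp [pvChunksFrom]
  | cons r rs ih =>
    intro acc l
    simp only [List.foldl_cons, pvChunksFrom]
    rw [ih]
    simp

theorem pvChunksFrom_map (x : String) (step : Int) :
    ∀ (c : Nat) (j : Int),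
    pvChunksFrom x (j * step) ((List.range c).map (fun (p : Nat) => (j + (p : Int) + 1) * step))
      = (List.range c).map (fun (p : Nat) => PySem.Str.slice x (some ((j + (p : Int)) * step)) (some ((j + (p : Int) + 1) * step))) := by
  intro c
  induction c with
  | zero => intro j; simp [pvChunksFrom]
  | succ c ih =>
    intro j
    rw [List.range_succ_eq_map]
    simp only [List.map_cons, List.map_map, pvChunksFrom, Nat.cast_zero, add_zero]
    congr 1
    have h1 : (List.range c).map ((fun (p : Nat) => (j + (p : Int) + 1) * step) ∘ Nat.succ)
        = (List.range c).map (fun (p : Nat) => ((j + 1) + (p : Int) + 1) * step) := by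
      apply List.map_congr_left; intro p _
      simp only [Function.comp_apply]; push_cast; ring
    rw [h1, ih (j + 1)]
    apply List.map_congr_left; intro p _
    simp only [Function.comp_apply]
    push_cast
    ring_nf

theorem pv_len_nonneg (x : String) : 0 ≤ PySem.Str.len x := by
  simp [PySem.Str.len_eq]

theorem pvSplit_eq (x : String) (k : Int)
    (hk : k ≠ 0) (hstep : PySem.Int.floordiv (PySem.Str.len x) k ≠ 0) :
    pvSplitA x k = pvChunks x k := by
  unfold pvSplitA pvChunks
  set n := PySem.Str.len x with hn
  set step := PySem.Int.floordiv n k with hstepdef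
  have hn0 : 0 ≤ n := pv_len_nonneg x
  rcases lt_or_gt_of_ne hstep with hneg | hpos
  · -- negative step: both chunk lists are empty
    have hA : PySem.List.pyRange step (n + 1) step = [] := by
      unfold PySem.List.pyRange
      have h1 : ¬ step = 0 := hstep
      have h2 : ¬ 0 < step := by omega
      have h3 : ¬ n + 1 < step := by omega
      simp [h1, h2, h3]
    have hm : PySem.Int.floordiv n step ≤ 0 := by
      have hdm := PySem.Int.floordiv_mul_add_mod n step
      have hb := PySem.Int.mod_neg_bounds (a := n) hneg
      by_contra hc
      push_neg at hc
      have : PySem.Int.floordiv n step * step < 0 :=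
        mul_neg_of_pos_of_neg hc hneg
      omega
    have hB : PySem.List.pyRange 0 (PySem.Int.floordiv n step) 1 = [] :=
      PySem.List.pyRange_one_eq_nil (by omega)
    rw [hA, hB]
    simp
  · -- positive step
    have hkpos : 0 < k := by
      by_contra hc
      push_neg at hc
      have hklt : k < 0 := lt_of_le_of_ne hc hk
      have hdm := PySem.Int.floordiv_mul_add_mod n k
      have hb := PySem.Int.mod_neg_bounds (a := n) hklt
      have h2 : step * k < 0 := mul_neg_of_pos_of_neg hpos hklt
      rw [hstepdef] at h2
      omega
    have hstep_le : step ≤ n := by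
      rw [hstepdef, PySem.Int.floordiv_eq_ediv_of_pos hkpos]
      exact Int.ediv_le_self k hn0
    have hlt : step < n + 1 := by omega
    rw [PySem.List.pyRange_of_pos _ _ hpos, PySem.List.pyRange_one]
    simp only [if_pos hlt]
    have harg : n + 1 - step + step - 1 = n := by ring
    rw [harg]
    have hfd : PySem.Int.floordiv n step = n / step := PySem.Int.floordiv_eq_ediv_of_pos hpos
    rw [hfd]
    have hcnt : (n / step - 0).toNat = (n / step).toNat := by simp
    rw [hcnt]
    have hmapA : (List.range (n / step).toNat).map (fun (p : Nat) => step + step * (p : Int))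
        = (List.range (n / step).toNat).map (fun (p : Nat) => ((0 : Int) + (p : Int) + 1) * step) := by
      apply List.map_congr_left; intro p _; ring
    rw [pvFoldA_eq, hmapA, List.nil_append]
    have hcm := pvChunksFrom_map x step ((n / step).toNat) 0
    rw [zero_mul] at hcm
    rw [hcm, List.map_map]
    apply List.map_congr_left; intro p _
    simp only [Function.comp_apply]

theorem pv_count_cons (x a : String) (l : List String) :
    (a :: l).count x = l.count x + (if x = a then 1 else 0) := by
  rw [List.count_cons]
  by_cases hxa : x = a
  · simp [hxa]
  · simp [hxa, Ne.symm hxa]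

theorem pv_count_head_zero (y c : String) (l : List String)
    (hyc : y < c) (hl : ∀ z ∈ l, c ≤ z) : (c :: l).count y = 0 := by
  rw [List.count_eq_zero]
  intro hmem
  rcases List.mem_cons.mp hmem with h1 | h1
  · exact absurd h1 (ne_of_lt hyc)
  · exact absurd hyc (not_lt.mpr (hl y h1))

-- A's draw-down loop succeeds iff the dict dominates the multiset of the list (dict nonneg).
theorem pvDrawDown_iff (M : List String) (d : PySem.Dict String Int)
    (h : ∀ x, 0 ≤ d.getD x 0) :
    pvDrawDown d M = true ↔ ∀ x, (M.count x : Int) ≤ d.getD x 0 := by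
  induction M generalizing d with
  | nil => simp [pvDrawDown]; intro x; simpa using h x
  | cons c cs ih =>
    simp only [pvDrawDown]
    by_cases h0 : d.getD c 0 = 0
    · have hcond : (d.getD c 0 == 0) = true := by simp [h0]
      rw [hcond]
      simp only [if_true, Bool.false_eq_true, false_iff]
      push_neg
      refine ⟨c, ?_⟩
      rw [h0, pv_count_cons c c cs]
      simp only [if_pos rfl]
      push_cast
      omega
    · have hge : 1 ≤ d.getD c 0 := by have := h c; omega
      have hcond : (d.getD c 0 == 0) = false := by simp [h0]
      rw [hcond]
      simp only [Bool.false_eq_true, if_false]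
      rw [ih _ ?hnn]
      case hnn =>
        intro x
        rw [PySem.Dict.getD_modify]
        by_cases hxc : x = c
        · simp only [hxc, if_pos rfl]; omega
        · simp only [if_neg hxc]; exact h x
      constructor
      · intro hall x
        have hx := hall x
        rw [PySem.Dict.getD_modify] at hx
        rw [pv_count_cons x c cs]
        by_cases hxc : x = c
        · subst hxc; simp only [if_pos rfl] at hx ⊢; push_cast; push_cast at hx; omega
        · simp only [if_neg hxc] at hx ⊢; push_cast; push_cast at hx; omega
      · intro hall x
        have hx := hall x
        rw [pv_count_cons x c cs] at hx
        rw [PySem.Dict.getD_modify]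
        by_cases hxc : x = c
        · subst hxc; simp only [if_pos rfl] at hx ⊢; push_cast at hx; omega
        · simp only [if_neg hxc] at hx ⊢; push_cast at hx; push_cast; omega

-- B's merge over two sorted lists succeeds iff the first multiset dominates the second.
theorem pvMerge_iff (ss : List String) (cs : List String)
    (hs : ss.Pairwise (· ≤ ·)) (hc : cs.Pairwise (· ≤ ·)) :
    pvMerge ss cs = true ↔ ∀ x, cs.count x ≤ ss.count x := by
  induction ss generalizing cs with
  | nil =>
    cases cs with
    | nil => simp [pvMerge]
    | cons c cs' =>
      simp only [pvMerge, Bool.false_eq_true, false_iff]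
      push_neg
      refine ⟨c, ?_⟩
      rw [pv_count_cons c c cs']
      simp
  | cons a ss' ih =>
    cases cs with
    | nil => simp [pvMerge]
    | cons c cs' =>
      obtain ⟨hsa, hs'⟩ := List.pairwise_cons.mp hs
      obtain ⟨hca, hc'⟩ := List.pairwise_cons.mp hc
      simp only [pvMerge]
      by_cases hlt : a < c
      · rw [if_pos hlt, ih (c :: cs') hs' hc]
        have hz : (c :: cs').count a = 0 := pv_count_head_zero a c cs' hlt hca
        constructor
        · intro hall x
          rw [pv_count_cons x a ss']
          by_cases hxa : x = a
          · subst hxa; rw [hz]; omega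
          · have := hall x; simp only [if_neg hxa]; omega
        · intro hall x
          have hx := hall x
          rw [pv_count_cons x a ss'] at hx
          by_cases hxa : x = a
          · subst hxa; rw [hz]; omega
          · simp only [if_neg hxa] at hx; omega
      · by_cases heq : a = c
        · subst heq
          have hcond : (a == a) = true := by simp
          rw [if_neg hlt, hcond]
          simp only [if_true]
          rw [ih cs' hs' hc']
          constructor
          · intro hall x
            rw [pv_count_cons x a cs', pv_count_cons x a ss']
            have := hall x; omega
          · intro hall x
            have hx := hall x
            rw [pv_count_cons x a cs', pv_count_cons x a ss'] at hx
            omega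
        · have hgt : c < a := lt_of_le_of_ne (not_lt.mp hlt) (fun h1 => heq h1.symm)
          have hcond : (a == c) = false := by simp [heq]
          rw [if_neg hlt, hcond]
          simp only [Bool.false_eq_true, if_false, false_iff]
          intro hall
          have hz : (a :: ss').count c = 0 := pv_count_head_zero c a ss' hgt hsa
          have hx := hall c
          rw [pv_count_cons c c cs', hz] at hx
          simp at hx

-- the two subset checks agree for arbitrary chunk lists
theorem pvDraw_eq_merge (L M : List String) :
    pvDrawDown (L.foldl (fun d x => d.modify x 0 (· + 1)) PySem.Dict.empty) M
      = pvMerge (PySem.List.sorted L (fun x => x) false) (PySem.List.sorted M (fun x => x) false) := by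
  rw [← PySem.Dict.counter_eq_foldl]
  have h1 : pvDrawDown (PySem.Dict.counter L) M = true ↔ ∀ x, M.count x ≤ L.count x := by
    rw [pvDrawDown_iff M _ (by intro x; rw [PySem.Dict.getD_counter]; positivity)]
    constructor
    · intro hall x; have := hall x; rw [PySem.Dict.getD_counter] at this; exact_mod_cast this
    · intro hall x; rw [PySem.Dict.getD_counter]; exact_mod_cast hall x
  have h2 : pvMerge (PySem.List.sorted L (fun x => x) false) (PySem.List.sorted M (fun x => x) false) = true
      ↔ ∀ x, M.count x ≤ L.count x := by
    rw [pvMerge_iff _ _ (PySem.List.sorted_pairwise L (fun x => x)) (PySem.List.sorted_pairwise M (fun x => x))]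
    constructor
    · intro hall x
      have hx := hall x
      rwa [(PySem.List.sorted_perm L (fun x => x) false).count_eq,
           (PySem.List.sorted_perm M (fun x => x) false).count_eq] at hx
    · intro hall x
      rw [(PySem.List.sorted_perm L (fun x => x) false).count_eq,
          (PySem.List.sorted_perm M (fun x => x) false).count_eq]
      exact hall x
  rw [Bool.eq_iff_iff, h1, h2]

-- ===== VERDICT (by name: the statement is the Claim_ definition above) =====
theorem isPossibleToRearrange_spec : Claim_equal_isPossibleToRearrange := by
  intro s t k _ hpre
  unfold Spec_isPossibleToRearrange isPossibleToRearrange isPossibleToRearrange_alt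
  by_cases hst : s == t
  · simp [hst]
  · simp only [hst, Bool.false_eq_true, if_false]
    rcases hpre with heq | ⟨hk, hs, ht⟩
    · exact absurd (beq_iff_eq.mpr heq) (by simpa using hst)
    · rw [pvDraw_eq_merge (pvSplitA s k) (pvSplitA t k),
          pvSplit_eq s k hk hs, pvSplit_eq t k hk ht]
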